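-- pv_equiv track=rewrite | github.com/Flying-Fairy/advent-of-code-2023 | python/day14p2.py | fall_west
-- ===== SOURCE A (Python) =====
-- def fall_west(pos, grid):
--     x, y = pos
--     if y == 0:
--         return pos
--     if grid[x][y - 1] in "O#":
--         return (x, y)
--     else:
--         return fall_west((x, y - 1), grid)
-- ===== SOURCE B (Python) =====
-- def fall_west(pos, grid):
--     x, y = pos
--     rest = 0
--     for j in range(y):
--         if grid[x][j] in "O#":
--             rest = j + 1
--     return (x, rest) if y > 0 else (x, y)
-- ===== Notes on version B (the rewrite author's own statement) =====
-- stated objective: alternative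
-- what changed: Replaces A's rightward tail recursion that steps y down one cell at a time with a single left-to-right scan of grid[x][0:y] keeping the index after the last blocker; same O(width) cost, different traversal order and state.
-- outside the precondition, e.g. on fall_west((0, -1), [['#', '.', '.']]): A returns (0, -2), B returns (0, -1)
import Mathlib
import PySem

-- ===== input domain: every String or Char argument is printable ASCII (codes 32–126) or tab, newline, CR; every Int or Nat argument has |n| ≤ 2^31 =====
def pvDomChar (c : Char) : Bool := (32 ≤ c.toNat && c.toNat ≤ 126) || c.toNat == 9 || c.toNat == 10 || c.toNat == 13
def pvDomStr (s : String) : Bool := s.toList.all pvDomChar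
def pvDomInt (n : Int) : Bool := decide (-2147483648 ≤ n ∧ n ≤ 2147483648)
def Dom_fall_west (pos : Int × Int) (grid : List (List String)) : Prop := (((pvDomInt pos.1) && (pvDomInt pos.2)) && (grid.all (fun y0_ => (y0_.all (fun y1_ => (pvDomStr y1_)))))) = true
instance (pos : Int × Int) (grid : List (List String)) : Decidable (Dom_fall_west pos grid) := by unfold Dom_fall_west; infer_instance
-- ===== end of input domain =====

-- B replaces A's rightward step-by-step tail recursion by one left-to-right scan of the
-- row prefix keeping the index after the last blocker (objective: alternative, same cost).

-- ===== PORT A =====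
-- A's tail recursion on y; the Nat fuel only makes it total (it is large enough for every
-- input on which the Python recursion terminates: y.toNat steps for positive y, at most
-- row-length steps of negative-index wraparound for negative y).
def fallWestRec (fuel : Nat) (pos : Int × Int) (grid : List (List String)) : Int × Int :=
  match fuel with
  | 0 => pos
  | Nat.succ f =>
    if pos.2 = 0 then pos
    else
      match PySem.List.pyGet? grid pos.1 with
      | none => pos  -- Python: IndexError (outside Pre_)
      | some row =>
        match PySem.List.pyGet? row (pos.2 - 1) with
        | none => pos  -- Python: IndexError (outside Pre_)
        | some cell =>
          if PySem.Str.isIn cell "O#" then (pos.1, pos.2)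
          else fallWestRec f (pos.1, pos.2 - 1) grid

def fall_west (pos : Int × Int) (grid : List (List String)) : Int × Int :=
  fallWestRec (pos.2.toNat + ((PySem.List.pyGet? grid pos.1).getD []).length + 1) pos grid

-- ===== PORT B =====
-- grid[x][j]; Python raises IndexError out of range (outside Pre_), the defaults are unreachable under Pre_
def cellAt (grid : List (List String)) (x j : Int) : String :=
  (PySem.List.pyGet? ((PySem.List.pyGet? grid x).getD []) j).getD ""

def fall_west_alt (pos : Int × Int) (grid : List (List String)) : Int × Int :=
  let rest := (PySem.List.pyRange 0 pos.2 1).foldl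
    (fun acc j => if PySem.Str.isIn (cellAt grid pos.1 j) "O#" then j + 1 else acc) (0 : Int)
  if pos.2 > 0 then (pos.1, rest) else (pos.1, pos.2)

-- ===== PRECONDITION & SPEC =====
-- Pre_ excludes inputs where A raises IndexError (x out of range with y ≠ 0, or y > len(grid[x]))
-- and negative y — outside the natural domain of the rolling simulation, where A walks through
-- Python's negative-index wraparound (an implementation accident) while B returns pos — except
-- the negative-y inputs whose immediately-west (wrapped) cell is a blocker, where both return pos.
def Pre_fall_west (pos : Int × Int) (grid : List (List String)) : Prop :=
  pos.2 = 0 ∨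
    (1 ≤ pos.2 ∧ (PySem.List.pyGet? grid pos.1).isSome ∧
      pos.2 ≤ ((PySem.List.pyGet? grid pos.1).getD []).length) ∨
    (pos.2 < 0 ∧
      (PySem.List.pyGet?
        (((PySem.List.pyGet? grid pos.1).getD [])) (pos.2 - 1)).any
          (fun cell => PySem.Str.isIn cell "O#") ∧
      (PySem.List.pyGet? grid pos.1).isSome)
instance (pos : Int × Int) (grid : List (List String)) : Decidable (Pre_fall_west pos grid) := by
  unfold Pre_fall_west; infer_instance

def pvWitness_fall_west : (Int × Int) × List (List String) := ((0, 1), [["."]])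

def Spec_fall_west (pos : Int × Int) (grid : List (List String)) (out : Int × Int) : Prop := out = fall_west_alt pos grid
instance (pos : Int × Int) (grid : List (List String)) (out : Int × Int) : Decidable (Spec_fall_west pos grid out) := by unfold Spec_fall_west; infer_instance

-- ===== CLAIM (what is proved, stated in full; the proofs are below) =====
def Claim_equal_fall_west : Prop := ∀ (pos : Int × Int) (grid : List (List String)), Dom_fall_west pos grid → Pre_fall_west pos grid → Spec_fall_west pos grid (fall_west pos grid)

-- ===== LEMMAS AND PROOFS =====

-- B's accumulator after scanning the first n cells of the row.
def lastStop (grid : List (List String)) (x : Int) (n : Nat) : Int :=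
  (PySem.List.pyRange 0 (n : Int) 1).foldl
    (fun acc j => if PySem.Str.isIn (cellAt grid x j) "O#" then j + 1 else acc) (0 : Int)

lemma lastStop_succ (grid : List (List String)) (x : Int) (n : Nat) :
    lastStop grid x (n + 1) =
      if PySem.Str.isIn (cellAt grid x (n : Int)) "O#" then ((n : Int) + 1)
      else lastStop grid x n := by
  unfold lastStop
  rw [show ((n + 1 : Nat) : Int) = (n : Int) + 1 by push_cast; ring,
    PySem.List.pyRange_one_append 0 (n : Int) ((n : Int) + 1) (by omega) (by omega),
    PySem.List.pyRange_one_cons (a := (n : Int)) (b := (n : Int) + 1) (by omega)]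
  simp [PySem.List.pyRange, List.foldl_append]

lemma rec_eq_lastStop (grid : List (List String)) (x : Int) (row : List String)
    (hrow : PySem.List.pyGet? grid x = some row) :
    ∀ n : Nat, n ≤ row.length → ∀ fuel : Nat, n ≤ fuel →
      fallWestRec fuel (x, (n : Int)) grid = (x, lastStop grid x n) := by
  intro n
  induction n with
  | zero =>
    intro _ fuel _
    cases fuel with
    | zero => simp [fallWestRec, lastStop, PySem.List.pyRange]
    | succ f => simp [fallWestRec, lastStop, PySem.List.pyRange]
  | succ n ih =>
    intro hlen fuel hfuel
    cases fuel with
    | zero => omega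
    | succ f =>
      have hn : n < row.length := by omega
      have h0 : ¬((n : Int) + 1 = 0) := by omega
      have hidx : ((n : Int) + 1 - 1) = ((n : Nat) : Int) := by ring
      push_cast
      simp only [fallWestRec, if_neg h0, hrow, hidx, PySem.List.pyGet?_natCast,
        List.getElem?_eq_getElem hn]
      rw [lastStop_succ grid x n]
      have hcell : cellAt grid x (n : Int) = row[n] := by
        simp [cellAt, hrow, List.getElem?_eq_getElem hn]
      rw [hcell]
      simp only [PySem.Str.isIn, String.toList]
      split_ifs with hb
      · rfl
      · exact ih (by omega) f (by omega)

-- ===== VERDICT (by name: the statement is the Claim_ definition above) =====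
theorem fall_west_spec : Claim_equal_fall_west := by
  intro pos grid _ hpre
  obtain ⟨x, y⟩ := pos
  unfold Spec_fall_west
  rcases hpre with h0 | ⟨h1, hsome, hlen⟩ | ⟨hneg, hblk, hsome⟩
  · simp only at h0
    subst h0
    simp [fall_west, fall_west_alt, fallWestRec]
  case inr.inr =>
    simp only at hneg hblk hsome
    obtain ⟨row, hrow⟩ := Option.isSome_iff_exists.mp hsome
    rw [hrow] at hblk
    simp only [Option.getD_some, Option.any] at hblk
    obtain ⟨cell, hcell⟩ : ∃ c, PySem.List.pyGet? row (y - 1) = some c := by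
      cases h : PySem.List.pyGet? row (y - 1) with
      | none => rw [h] at hblk; simp at hblk
      | some c => exact ⟨c, rfl⟩
    rw [hcell] at hblk
    unfold fall_west fall_west_alt
    simp only [hrow, Option.getD_some]
    rw [show y.toNat + row.length + 1 = (y.toNat + row.length) + 1 by ring]
    simp only [fallWestRec, if_neg (show ¬(y = 0) by omega), hrow, hcell, hblk, if_true]
    rw [if_neg (by omega)]
  · simp only at h1 hsome hlen
    obtain ⟨row, hrow⟩ := Option.isSome_iff_exists.mp hsome
    rw [hrow] at hlen
    simp only [Option.getD_some] at hlen
    obtain ⟨n, rfl⟩ : ∃ m : Nat, y = (m : Int) := ⟨y.toNat, by omega⟩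
    have hnlen : n ≤ row.length := by omega
    unfold fall_west
    simp only [Int.toNat_natCast]
    rw [rec_eq_lastStop grid x row hrow n hnlen _ (by omega)]
    unfold fall_west_alt
    simp only
    rw [if_pos (by exact_mod_cast h1)]
    rfl
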